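-- pv_equiv track=rewrite | github.com/MahdiehMoghiseh/ComputerNetworks | CN-CHW1/CN1-2/utils.py | udp_str
-- ===== SOURCE A (Python) =====
-- def udp_str(data:str):
--     data = data[::-1]
--     data = data.upper()
--
--     char_count = {}
--     for i in range(26):
--         char_count[chr(i + 65)] = 0
--     for ch in data:
--         if ch > 'Z' or ch < 'A':
--             continue
--         char_count[ch] += 1
--
--     char_count_sorted = dict(sorted(char_count.items(), key=lambda item: item[1], reverse=True))
--     return f'{data}, {next(iter(char_count_sorted.items()))[0]}'
-- ===== SOURCE B (Python) =====
-- def udp_str(data: str):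
--     s = data[::-1].upper()
--     counts = [0] * 26
--     for ch in s:
--         o = ord(ch)
--         if 65 <= o <= 90:
--             counts[o - 65] += 1
--     best = 0
--     for i in range(1, 26):
--         if counts[i] > counts[best]:
--             best = i
--     return f'{s}, {chr(best + 65)}'
-- ===== Notes on version B (the rewrite author's own statement) =====
-- stated objective: simpler
-- what changed: Replaced the 26-key dict plus stable descending sort of all counts by a flat 26-slot array and a single strict-greater linear scan over A..Z that yields the alphabetically-first maximum directly.
import Mathlib
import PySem

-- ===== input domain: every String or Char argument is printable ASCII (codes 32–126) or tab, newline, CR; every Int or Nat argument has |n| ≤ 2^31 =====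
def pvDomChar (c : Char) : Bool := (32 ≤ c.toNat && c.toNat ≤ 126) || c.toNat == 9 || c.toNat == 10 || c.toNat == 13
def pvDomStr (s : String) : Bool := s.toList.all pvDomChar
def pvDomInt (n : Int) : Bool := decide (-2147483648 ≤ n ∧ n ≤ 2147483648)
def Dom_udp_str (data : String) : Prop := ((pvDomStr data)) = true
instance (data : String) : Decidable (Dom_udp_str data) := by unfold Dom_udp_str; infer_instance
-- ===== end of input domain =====

-- B replaces A's 26-key dict + stable descending sort of the counts by a flat 26-slot
-- array and a single strict-greater scan over A..Z (alphabetically-first maximum).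

-- ===== PORT A =====
def udp_str (data : String) : String :=
  let d := PySem.Str.upper ((PySem.Str.slice? data none none (-1)).getD data)  -- data[::-1]; step = -1, never raises
  let cc0 : PySem.Dict Char Int :=
    (PySem.List.pyRange 0 26 1).foldl
      (fun acc i => acc.insert (Char.ofNat (i + 65).toNat) 0) PySem.Dict.empty
  let cc : PySem.Dict Char Int :=
    d.toList.foldl
      (fun acc ch => if ch > 'Z' ∨ ch < 'A' then acc else acc.modify ch 0 (· + 1)) cc0
  let srt := PySem.List.sorted cc.items (fun item => item.2) true
  d ++ ", " ++ String.ofList [(srt.headD ('A', 0)).1]   -- next(iter(...)): srt has the 26 items, never empty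

-- ===== PORT B =====
def udp_str_alt (data : String) : String :=
  let s := PySem.Str.upper ((PySem.Str.slice? data none none (-1)).getD data)
  let counts : List Int :=
    s.toList.foldl
      (fun cs ch =>
        let o : Int := ch.toNat
        if 65 ≤ o ∧ o ≤ 90 then
          PySem.List.pySetD cs (o - 65) (PySem.List.pyGetD cs (o - 65) 0 + 1)
        else cs)
      (PySem.List.pyRepeat [(0 : Int)] 26)
  let best : Int :=
    (PySem.List.pyRange 1 26 1).foldl
      (fun b i => if PySem.List.pyGetD counts b 0 < PySem.List.pyGetD counts i 0 then i else b) 0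
  s ++ ", " ++ String.ofList [Char.ofNat (best + 65).toNat]

-- ===== PRECONDITION & SPEC =====
def Spec_udp_str (data : String) (out : String) : Prop := out = udp_str_alt data
instance (data : String) (out : String) : Decidable (Spec_udp_str data out) := by unfold Spec_udp_str; infer_instance

-- ===== CLAIM (what is proved, stated in full; the proofs are below) =====
def Claim_equal_udp_str : Prop := ∀ (data : String), Dom_udp_str data → Spec_udp_str data (udp_str data)

-- ===== LEMMAS AND PROOFS =====

-- abbreviations used only by the proofs
def pvLetter (i : Nat) : Char := Char.ofNat (i + 65)

def pvKeep (ch : Char) : Bool := decide (¬ (ch > 'Z' ∨ ch < 'A'))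

lemma pv_cond (ch : Char) : (¬ (ch > 'Z' ∨ ch < 'A')) ↔ (65 ≤ (ch.toNat : Int) ∧ (ch.toNat : Int) ≤ 90) := by
  have h1 : (ch < 'A') ↔ ch.toNat < 65 := gt_iff_lt
  have h2 : ('Z' < ch) ↔ 90 < ch.toNat := gt_iff_lt
  rw [gt_iff_lt, h2, h1]
  constructor
  · intro h; omega
  · intro h; omega

lemma pv_letter_toNat : ∀ i < 26, (pvLetter i).toNat = i + 65 := by decide

lemma pv_letter_inj {i j : Nat} (hi : i < 26) (hj : j < 26) (h : pvLetter i = pvLetter j) : i = j := by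
  have h1 := pv_letter_toNat i hi
  have h2 := pv_letter_toNat j hj
  have h3 : (pvLetter i).toNat = (pvLetter j).toNat := by rw [h]
  omega

lemma pv_keep_letter : ∀ i < 26, pvKeep (pvLetter i) = true := by decide

lemma pv_insertBy_nil {α : Type} (before : α → α → Bool) (x : α) :
    PySem.List.insertBy before x [] = [x] := rfl

lemma pv_headD_foldl_insertBy {α κ : Type} [LT κ] [DecidableLT κ] (key : α → κ) (d : α) :
    ∀ (l : List α) (a : α) (t : List α),
      (l.foldl (fun acc x => PySem.List.insertBy (fun p q => decide (key q < key p)) x acc) (a :: t)).headD d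
        = l.foldl (fun b x => if key b < key x then x else b) a := by
  intro l
  induction l with
  | nil => intro a t; rfl
  | cons x l ih =>
    intro a t
    simp only [List.foldl_cons]
    rw [show PySem.List.insertBy (fun p q => decide (key q < key p)) x (a :: t)
          = if decide (key a < key x) then x :: a :: t
            else a :: PySem.List.insertBy (fun p q => decide (key q < key p)) x t from rfl]
    by_cases h : key a < key x
    · simp only [h, decide_true, if_true, ih]
    · simp only [h, decide_false, Bool.false_eq_true, if_false, ih]

lemma pv_foldl_scan_map {α : Type} (pair : Nat → α) (key : α → Int) (is : List Nat) :
    ∀ (b : Nat) (init : α), init = pair b →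
      (is.map pair).foldl (fun p q => if key p < key q then q else p) init
        = pair (is.foldl (fun b i => if key (pair b) < key (pair i) then i else b) b) := by
  induction is with
  | nil => intro b init hinit; simpa using hinit
  | cons i t ih =>
    intro b init hinit
    subst hinit
    simp only [List.map_cons, List.foldl_cons]
    by_cases h : key (pair b) < key (pair i)
    · simp only [h, if_true]; exact ih i _ rfl
    · simp only [h, if_false]; exact ih b _ rfl

lemma pv_foldl_scan_int (g : Nat → Int) (n : Nat) (is : List Nat) :
    ∀ b : Nat, b < n → (∀ i ∈ is, i < n) →
      (is.map (fun k => Int.ofNat k)).foldl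
          (fun bI iI =>
            if PySem.List.pyGetD ((List.range n).map g) bI 0
                < PySem.List.pyGetD ((List.range n).map g) iI 0 then iI else bI) (Int.ofNat b)
        = Int.ofNat (is.foldl (fun b i => if g b < g i then i else b) b) := by
  induction is with
  | nil => intro b _ _; rfl
  | cons i t ih =>
    intro b hb ht
    have hi : i < n := ht i List.mem_cons_self
    have ht' : ∀ j ∈ t, j < n := fun j hj => ht j (List.mem_cons_of_mem i hj)
    simp only [List.map_cons, List.foldl_cons]
    have e1 : PySem.List.pyGetD ((List.range n).map g) (Int.ofNat b) 0 = g b := by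
      rw [show Int.ofNat b = ((b : Nat) : Int) from rfl, PySem.List.pyGetD_natCast,
        PySem.List.getD_map_range g n b 0 hb]
    have e2 : PySem.List.pyGetD ((List.range n).map g) (Int.ofNat i) 0 = g i := by
      rw [show Int.ofNat i = ((i : Nat) : Int) from rfl, PySem.List.pyGetD_natCast,
        PySem.List.getD_map_range g n i 0 hi]
    rw [e1, e2]
    by_cases h : g b < g i
    · simp only [h, if_true]; exact ih i hi ht'
    · simp only [h, if_false]; exact ih b hb ht'

lemma pv_set_map_range (g : Nat → Int) (n j : Nat) (v : Int) (hj : j < n) :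
    ((List.range n).map g).set j v = (List.range n).map (fun i => if i = j then v else g i) := by
  apply List.ext_getElem (by simp)
  intro i h1 h2
  simp only [List.getElem_set, List.getElem_map, List.getElem_range]
  by_cases h : i = j
  · simp [h]
  · simp [h, Ne.symm h]

lemma pv_counts_foldl (u : List Char) :
    ∀ g : Nat → Int,
      u.foldl (fun cs ch =>
          if 65 ≤ (ch.toNat : Int) ∧ (ch.toNat : Int) ≤ 90 then
            PySem.List.pySetD cs ((ch.toNat : Int) - 65)
              (PySem.List.pyGetD cs ((ch.toNat : Int) - 65) 0 + 1)
          else cs)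
        ((List.range 26).map g)
      = (List.range 26).map (fun i => g i + (u.count (pvLetter i) : Int)) := by
  induction u with
  | nil => intro g; simp
  | cons ch t ih =>
    intro g
    simp only [List.foldl_cons]
    by_cases h : 65 ≤ (ch.toNat : Int) ∧ (ch.toNat : Int) ≤ 90
    · have h65 : 65 ≤ ch.toNat := by exact_mod_cast h.1
      have h90 : ch.toNat ≤ 90 := by exact_mod_cast h.2
      have hj : ch.toNat - 65 < 26 := by omega
      have hch : ch = pvLetter (ch.toNat - 65) := by
        unfold pvLetter
        rw [show ch.toNat - 65 + 65 = ch.toNat by omega]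
        exact (Char.ofNat_toNat ch).symm
      have hcast : (ch.toNat : Int) - 65 = ((ch.toNat - 65 : Nat) : Int) := by omega
      rw [if_pos h, hcast, PySem.List.pySetD_natCast, PySem.List.pyGetD_natCast,
        PySem.List.getD_map_range g 26 (ch.toNat - 65) 0 hj,
        pv_set_map_range g 26 (ch.toNat - 65) _ hj, ih]
      apply List.map_congr_left
      intro i hi
      have hi26 : i < 26 := List.mem_range.mp hi
      by_cases hij : i = ch.toNat - 65
      · subst hij
        rw [if_pos rfl, List.count_cons, if_pos (by rw [← hch]; simp)]
        push_cast
        ring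
      · rw [if_neg hij, List.count_cons, if_neg (by
          simp only [beq_iff_eq]
          intro hc
          exact hij (pv_letter_inj hi26 hj (by rw [← hc, ← hch]))), Nat.add_zero]
    · rw [if_neg h, ih]
      apply List.map_congr_left
      intro i hi
      have hi26 : i < 26 := List.mem_range.mp hi
      rw [List.count_cons, if_neg (by
        simp only [beq_iff_eq]
        intro hc
        have h1 := pv_letter_toNat i hi26
        have h2 : ch.toNat = (pvLetter i).toNat := by rw [hc]
        omega), Nat.add_zero]

lemma pv_update_of_subset {α : Type} [BEq α] [LawfulBEq α] :
    ∀ (xs : List α) (s : PySem.Set α), (∀ x ∈ xs, x ∈ s) → PySem.Set.update s xs = s := by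
  intro xs
  induction xs with
  | nil => intro s _; rfl
  | cons x t ih =>
    intro s h
    have h0 : PySem.Set.update s (x :: t) = PySem.Set.update (PySem.Set.add s x) t := rfl
    rw [h0, PySem.Set.add_of_mem (h x List.mem_cons_self)]
    exact ih s (fun y hy => h y (List.mem_cons_of_mem x hy))

-- facts about A's closed initial dict (26 zeroed keys)
lemma pv_cc0_keys :
    ((PySem.List.pyRange 0 26 1).foldl
        (fun acc i => acc.insert (Char.ofNat (i + 65).toNat) 0)
        (PySem.Dict.empty : PySem.Dict Char Int)).keys
      = (List.range 26).map pvLetter := by decide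

lemma pv_cc0_nodup :
    ((PySem.List.pyRange 0 26 1).foldl
        (fun acc i => acc.insert (Char.ofNat (i + 65).toNat) 0)
        (PySem.Dict.empty : PySem.Dict Char Int)).keys.Nodup := by decide

lemma pv_cc0_getD : ∀ i < 26,
    ((PySem.List.pyRange 0 26 1).foldl
        (fun acc i => acc.insert (Char.ofNat (i + 65).toNat) 0)
        (PySem.Dict.empty : PySem.Dict Char Int)).getD (pvLetter i) 0 = 0 := by decide

-- the per-string core fact: A's chosen character equals B's chosen character
lemma pv_char (u : List Char) :
    ((PySem.List.sorted
        ((u.foldl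
            (fun acc ch => if ch > 'Z' ∨ ch < 'A' then acc else acc.modify ch 0 (· + 1))
            ((PySem.List.pyRange 0 26 1).foldl
              (fun acc i => acc.insert (Char.ofNat (i + 65).toNat) 0)
              (PySem.Dict.empty : PySem.Dict Char Int))).items)
        (fun item => item.2) true).headD ('A', 0)).1
    = Char.ofNat
        (((PySem.List.pyRange 1 26 1).foldl
            (fun b i =>
              if PySem.List.pyGetD
                    (u.foldl
                      (fun cs ch =>
                        if 65 ≤ (ch.toNat : Int) ∧ (ch.toNat : Int) ≤ 90 then
                          PySem.List.pySetD cs ((ch.toNat : Int) - 65)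
                            (PySem.List.pyGetD cs ((ch.toNat : Int) - 65) 0 + 1)
                        else cs)
                      (PySem.List.pyRepeat [(0 : Int)] 26)) b 0
                  < PySem.List.pyGetD
                      (u.foldl
                        (fun cs ch =>
                          if 65 ≤ (ch.toNat : Int) ∧ (ch.toNat : Int) ≤ 90 then
                            PySem.List.pySetD cs ((ch.toNat : Int) - 65)
                              (PySem.List.pyGetD cs ((ch.toNat : Int) - 65) 0 + 1)
                          else cs)
                        (PySem.List.pyRepeat [(0 : Int)] 26)) i 0
              then i else b) 0) + 65).toNat := by
  have hr26 : List.range 26 = 0 :: (List.range 25).map Nat.succ := by decide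
  have hrep : PySem.List.pyRepeat [(0 : Int)] 26 = (List.range 26).map (fun _ => (0 : Int)) := by decide
  have hpy : PySem.List.pyRange 1 26 1 = ((List.range 25).map Nat.succ).map (fun k => Int.ofNat k) := by decide
  -- B's counts list is the 26 letter counts
  have hcounts :
      u.foldl
        (fun cs ch =>
          if 65 ≤ (ch.toNat : Int) ∧ (ch.toNat : Int) ≤ 90 then
            PySem.List.pySetD cs ((ch.toNat : Int) - 65)
              (PySem.List.pyGetD cs ((ch.toNat : Int) - 65) 0 + 1)
          else cs)
        (PySem.List.pyRepeat [(0 : Int)] 26)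
      = (List.range 26).map (fun i => (u.count (pvLetter i) : Int)) := by
    rw [hrep, pv_counts_foldl u (fun _ => 0)]
    exact List.map_congr_left (fun i _ => by simp)
  -- A's counting loop is a fold of modifies over the filtered characters
  have hfoldA :
      (fun (acc : PySem.Dict Char Int) ch =>
          if ch > 'Z' ∨ ch < 'A' then acc else acc.modify ch 0 (· + 1))
        = (fun (acc : PySem.Dict Char Int) ch =>
            if pvKeep ch = true then acc.modify ch 0 (· + 1) else acc) := by
    funext acc ch
    by_cases h : ch > 'Z' ∨ ch < 'A' <;> simp [pvKeep, h]
  have hA :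
      u.foldl
          (fun (acc : PySem.Dict Char Int) ch =>
            if ch > 'Z' ∨ ch < 'A' then acc else acc.modify ch 0 (· + 1))
          ((PySem.List.pyRange 0 26 1).foldl
            (fun acc i => acc.insert (Char.ofNat (i + 65).toNat) 0) PySem.Dict.empty)
        = (u.filter pvKeep).foldl (fun d x => d.modify x 0 (· + 1))
            ((PySem.List.pyRange 0 26 1).foldl
              (fun acc i => acc.insert (Char.ofNat (i + 65).toNat) 0) PySem.Dict.empty) := by
    rw [hfoldA]
    exact List.foldl_filter.symm
  -- A's dict keeps exactly the 26 letter keys, in order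
  have hmem : ∀ x ∈ u.filter pvKeep,
      x ∈ ((PySem.List.pyRange 0 26 1).foldl
            (fun acc i => acc.insert (Char.ofNat (i + 65).toNat) 0)
            (PySem.Dict.empty : PySem.Dict Char Int)).keys := by
    intro x hx
    have hk : pvKeep x = true := (List.mem_filter.mp hx).2
    have hr : 65 ≤ (x.toNat : Int) ∧ (x.toNat : Int) ≤ 90 :=
      (pv_cond x).mp (of_decide_eq_true hk)
    have h65 : 65 ≤ x.toNat := by exact_mod_cast hr.1
    have h90 : x.toNat ≤ 90 := by exact_mod_cast hr.2
    rw [pv_cc0_keys]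
    refine List.mem_map.mpr ⟨x.toNat - 65, List.mem_range.mpr (by omega), ?_⟩
    unfold pvLetter
    rw [show x.toNat - 65 + 65 = x.toNat by omega]
    exact Char.ofNat_toNat x
  have hkeys :
      (((u.filter pvKeep).foldl (fun d x => d.modify x 0 (· + 1))
          ((PySem.List.pyRange 0 26 1).foldl
            (fun acc i => acc.insert (Char.ofNat (i + 65).toNat) 0)
            (PySem.Dict.empty : PySem.Dict Char Int)))).keys
        = ((PySem.List.pyRange 0 26 1).foldl
            (fun acc i => acc.insert (Char.ofNat (i + 65).toNat) 0)
            (PySem.Dict.empty : PySem.Dict Char Int)).keys := by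
    have h1 := PySem.Dict.keys_foldl_modify (κ := Char) (ν := Int) (u.filter pvKeep) 0
      (fun _ _ => (· + 1))
      ((PySem.List.pyRange 0 26 1).foldl
        (fun acc i => acc.insert (Char.ofNat (i + 65).toNat) 0) PySem.Dict.empty)
    exact h1.trans (pv_update_of_subset (u.filter pvKeep) _ hmem)
  have hnodup :
      (((u.filter pvKeep).foldl (fun d x => d.modify x 0 (· + 1))
          ((PySem.List.pyRange 0 26 1).foldl
            (fun acc i => acc.insert (Char.ofNat (i + 65).toNat) 0)
            (PySem.Dict.empty : PySem.Dict Char Int)))).keys.Nodup := by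
    rw [hkeys]; exact pv_cc0_nodup
  have hitems :
      ((u.filter pvKeep).foldl (fun d x => d.modify x 0 (· + 1))
          ((PySem.List.pyRange 0 26 1).foldl
            (fun acc i => acc.insert (Char.ofNat (i + 65).toNat) 0)
            (PySem.Dict.empty : PySem.Dict Char Int))).items
        = (List.range 26).map (fun i => (pvLetter i, (u.count (pvLetter i) : Int))) := by
    rw [PySem.Dict.items_eq_map_keys _ hnodup 0, hkeys, pv_cc0_keys, List.map_map]
    apply List.map_congr_left
    intro i hi
    have hi26 : i < 26 := List.mem_range.mp hi
    have hg := PySem.Dict.getD_foldl_modify_add_one (u.filter pvKeep)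
      ((PySem.List.pyRange 0 26 1).foldl
        (fun acc i => acc.insert (Char.ofNat (i + 65).toNat) 0)
        (PySem.Dict.empty : PySem.Dict Char Int)) (pvLetter i)
    simp only [Function.comp_apply]
    rw [hg, pv_cc0_getD i hi26, List.count_filter (pv_keep_letter i hi26), zero_add]
  rw [hA, hitems, hcounts, hpy]
  have hz := pv_foldl_scan_int (fun i => (u.count (pvLetter i) : Int)) 26
      ((List.range 25).map Nat.succ) 0 (by omega)
      (by intro i hi
          rcases List.mem_map.mp hi with ⟨k, hk, rfl⟩
          have := List.mem_range.mp hk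
          omega)
  rw [show Int.ofNat 0 = (0 : Int) from rfl] at hz
  rw [hz]
  rw [PySem.List.sorted_rev_eq_foldl_insertBy, hr26]
  simp only [List.map_cons, List.foldl_cons, pv_insertBy_nil]
  rw [pv_headD_foldl_insertBy (fun item : Char × Int => item.2) ('A', 0)]
  rw [pv_foldl_scan_map (fun i => (pvLetter i, (u.count (pvLetter i) : Int)))
      (fun item : Char × Int => item.2) ((List.range 25).map Nat.succ) 0 _ rfl]
  have hfin : ∀ m : Nat, ((Int.ofNat m) + 65).toNat = m + 65 := fun m => by
    rw [show Int.ofNat m = ((m : Nat) : Int) from rfl]; omega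
  rw [hfin]
  rfl

-- ===== VERDICT (by name: the statement is the Claim_ definition above) =====
theorem udp_str_spec : Claim_equal_udp_str := by
  intro data _
  unfold Spec_udp_str udp_str udp_str_alt
  simp only []
  generalize PySem.Str.upper ((PySem.Str.slice? data none none (-1)).getD data) = s
  have h := pv_char s.toList
  congr 1
  rw [h]
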